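-- pv_equiv track=rewrite | github.com/miguelsantos42/FPRO | FPRO23_24/Revisão/Teste1/TesteModelo1_2/exercise4_m.py | check_friendly
-- ===== SOURCE A (Python) =====
-- def check_friendly(number_one, number_two):
--     total_one = 0
--     total_two = 0
--
--     for i in range(1,number_one):
--         if number_one % i == 0:
--             total_one += i
--
--     for j in range(1,number_two):
--         if number_two % j == 0:
--             total_two += j
--
--     if number_one == number_two:
--         return(f"identical numbers: {number_one}")
--     else:
--         if total_one != number_two and total_two != number_one:
--             return(f"sum of divisors of {number_one} is not {number_two}")
--         elif total_one == number_two and total_two != number_one: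
--             return(f"sum of divisors of {number_two} is not {number_one}")
--         elif total_one != number_two and total_two == number_one:
--             return(f"sum of divisors of {number_one} is not {number_two}")
--         else:
--             return(f"{number_one} and {number_two} are friendly")
-- ===== SOURCE B (Python) =====
-- def _proper_divisor_sum(n):
--     # sum of divisors d with 1 <= d < n, pairing d with n // d up to sqrt(n)
--     total = 0
--     d = 1
--     while d * d <= n:
--         if n % d == 0:
--             if d < n:
--                 total += d
--             q = n // d
--             if q != d and q < n:
--                 total += q
--         d += 1
--     return total
--
--
-- def check_friendly(number_one, number_two):
--     total_one = _proper_divisor_sum(number_one)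
--     total_two = _proper_divisor_sum(number_two)
--
--     if number_one == number_two:
--         return f"identical numbers: {number_one}"
--     elif total_one == number_two and total_two == number_one:
--         return f"{number_one} and {number_two} are friendly"
--     elif total_one == number_two:
--         return f"sum of divisors of {number_two} is not {number_one}"
--     else:
--         return f"sum of divisors of {number_one} is not {number_two}"
-- ===== Notes on version B (the rewrite author's own statement) =====
-- stated objective: faster
-- what changed: Proper-divisor sums are computed by iterating d only up to sqrt(n) and adding each divisor d together with its cofactor n//d, instead of scanning every i in range(1, n); the four-way branch is collapsed to an if/elif chain.
import Mathlib
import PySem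

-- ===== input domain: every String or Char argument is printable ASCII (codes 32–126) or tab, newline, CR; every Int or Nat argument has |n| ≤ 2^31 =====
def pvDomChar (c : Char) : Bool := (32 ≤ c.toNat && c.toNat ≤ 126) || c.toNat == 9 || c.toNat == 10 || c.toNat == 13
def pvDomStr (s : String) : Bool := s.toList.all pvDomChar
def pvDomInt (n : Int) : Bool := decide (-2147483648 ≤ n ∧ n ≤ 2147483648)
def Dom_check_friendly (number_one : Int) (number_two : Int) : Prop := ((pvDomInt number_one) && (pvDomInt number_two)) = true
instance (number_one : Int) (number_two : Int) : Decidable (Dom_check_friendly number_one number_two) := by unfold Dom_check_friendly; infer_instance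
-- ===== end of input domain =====

-- B replaces A's O(n) scan of range(1, n) by the O(√n) paired-divisor loop (d and n//d up to √n); return value only, equal strings.

-- ===== PORT A =====
def check_friendly (number_one : Int) (number_two : Int) : String :=
  let total_one : Int :=
    (PySem.List.pyRange 1 number_one 1).foldl
      (fun total i => if PySem.Int.mod number_one i = 0 then total + i else total) 0
  let total_two : Int :=
    (PySem.List.pyRange 1 number_two 1).foldl
      (fun total j => if PySem.Int.mod number_two j = 0 then total + j else total) 0
  if number_one = number_two then
    "identical numbers: " ++ PySem.Int.toStr number_one
  else
    if total_one ≠ number_two ∧ total_two ≠ number_one then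
      "sum of divisors of " ++ PySem.Int.toStr number_one ++ " is not " ++ PySem.Int.toStr number_two
    else if total_one = number_two ∧ total_two ≠ number_one then
      "sum of divisors of " ++ PySem.Int.toStr number_two ++ " is not " ++ PySem.Int.toStr number_one
    else if total_one ≠ number_two ∧ total_two = number_one then
      "sum of divisors of " ++ PySem.Int.toStr number_one ++ " is not " ++ PySem.Int.toStr number_two
    else
      PySem.Int.toStr number_one ++ " and " ++ PySem.Int.toStr number_two ++ " are friendly"

-- ===== PORT B =====
-- while d * d <= n: collect d and its cofactor n // d (the loop counter d stays ≥ 1, so it is carried as a Nat)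
def properDivisorSumLoop (n : Int) (d : Nat) (total : Int) : Int :=
  if h : (d : Int) * (d : Int) ≤ n then
    let total' : Int :=
      if PySem.Int.mod n (d : Int) = 0 then
        let t1 : Int := if (d : Int) < n then total + (d : Int) else total
        let q : Int := PySem.Int.floordiv n (d : Int)
        if q ≠ (d : Int) ∧ q < n then t1 + q else t1
      else total
    properDivisorSumLoop n (d + 1) total'
  else total
termination_by (n + 1 - (d : Int) * (d : Int)).toNat
decreasing_by
  have h1 : ((d : Int) + 1) * ((d : Int) + 1) = (d : Int) * (d : Int) + 2 * (d : Int) + 1 := by ring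
  have h2 : (0 : Int) ≤ (d : Int) := Int.natCast_nonneg d
  push_cast
  omega

def check_friendly_alt (number_one : Int) (number_two : Int) : String :=
  let total_one : Int := properDivisorSumLoop number_one 1 0
  let total_two : Int := properDivisorSumLoop number_two 1 0
  if number_one = number_two then
    "identical numbers: " ++ PySem.Int.toStr number_one
  else if total_one = number_two ∧ total_two = number_one then
    PySem.Int.toStr number_one ++ " and " ++ PySem.Int.toStr number_two ++ " are friendly"
  else if total_one = number_two then
    "sum of divisors of " ++ PySem.Int.toStr number_two ++ " is not " ++ PySem.Int.toStr number_one
  else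
    "sum of divisors of " ++ PySem.Int.toStr number_one ++ " is not " ++ PySem.Int.toStr number_two

-- ===== PRECONDITION & SPEC =====
def Spec_check_friendly (number_one : Int) (number_two : Int) (out : String) : Prop := out = check_friendly_alt number_one number_two
instance (number_one : Int) (number_two : Int) (out : String) : Decidable (Spec_check_friendly number_one number_two out) := by unfold Spec_check_friendly; infer_instance

-- ===== CLAIM (what is proved, stated in full; the proofs are below) =====
def Claim_equal_check_friendly : Prop := ∀ (number_one : Int) (number_two : Int), Dom_check_friendly number_one number_two → Spec_check_friendly number_one number_two (check_friendly number_one number_two)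

-- ===== LEMMAS AND PROOFS =====

-- the mathematical sum of the proper divisors of m
def properSum (m : Nat) : Int := ∑ i ∈ (Finset.Ico 1 m).filter (· ∣ m), (i : Int)

-- contribution of one value of the loop counter d in B's loop
def contrib (m k : Nat) : Int :=
  if m % k = 0 then
    (if k < m then (k : Int) else 0) + (if m / k ≠ k ∧ m / k < m then ((m / k : Nat) : Int) else 0)
  else 0

-- a filtered accumulating fold over List.range is a Finset.range sum
theorem fold_filter_range (g : Nat → Int) (p : Int → Prop) [DecidablePred p] :
    ∀ (N : Nat) (t : Int),
      ((List.range N).map g).foldl (fun total i => if p i then total + i else total) t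
      = t + ∑ k ∈ Finset.range N, if p (g k) then g k else 0 := by
  intro N
  induction N with
  | zero => intro t; simp
  | succ N ih =>
    intro t
    rw [List.range_succ, List.map_append, List.foldl_append, ih, Finset.sum_range_succ]
    simp only [List.map_cons, List.map_nil, List.foldl_cons, List.foldl_nil]
    split_ifs <;> ring

-- A's loop computes properSum
theorem foldA_eq_properSum (m : Nat) :
    (PySem.List.pyRange 1 (m : Int) 1).foldl
      (fun total i => if PySem.Int.mod (m : Int) i = 0 then total + i else total) 0
    = properSum m := by
  have htn : (((m : Int)) - 1).toNat = m - 1 := by omega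
  rw [PySem.List.pyRange_one, htn, fold_filter_range, zero_add, properSum, Finset.sum_filter,
    Finset.sum_Ico_eq_sum_range]
  refine Finset.sum_congr rfl (fun k _ => ?_)
  have hcast : (1 : Int) + (k : Int) = ((1 + k : Nat) : Int) := by push_cast; ring
  rw [hcast, PySem.Int.mod_natCast]
  simp only [Nat.cast_eq_zero, ← Nat.dvd_iff_mod_eq_zero]

-- B's loop from counter d accumulates the remaining contributions
theorem loop_eq_sum_aux (m : Nat) : ∀ (N d : Nat), Nat.sqrt m + 1 - d = N → ∀ t : Int,
    properDivisorSumLoop (m : Int) d t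
    = t + ∑ k ∈ Finset.Ico d (Nat.sqrt m + 1), contrib m k := by
  intro N
  induction N with
  | zero =>
    intro d hN t
    have hdd : ¬ ((d : Int) * (d : Int) ≤ (m : Int)) := by
      intro hc
      have hn : d * d ≤ m := by exact_mod_cast hc
      have := Nat.le_sqrt.mpr hn
      omega
    rw [properDivisorSumLoop, dif_neg hdd, Finset.Ico_eq_empty (by omega), Finset.sum_empty,
      add_zero]
  | succ N ih =>
    intro d hN t
    by_cases hd : d ≤ Nat.sqrt m
    · have hdd : ((d : Int) * (d : Int) ≤ (m : Int)) := by exact_mod_cast Nat.le_sqrt.mp hd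
      have hlt : d < Nat.sqrt m + 1 := by omega
      rw [properDivisorSumLoop, dif_pos hdd, ih (d + 1) (by omega)]
      conv_rhs => rw [Finset.sum_eq_sum_Ico_succ_bot hlt (contrib m)]
      simp only [contrib, PySem.Int.mod_natCast, PySem.Int.floordiv_natCast, Nat.cast_eq_zero,
        Nat.cast_lt, ne_eq, Nat.cast_inj]
      split_ifs <;> ring
    · have hdd : ¬ ((d : Int) * (d : Int) ≤ (m : Int)) := by
        intro hc
        have hn : d * d ≤ m := by exact_mod_cast hc
        have := Nat.le_sqrt.mpr hn
        omega
      rw [properDivisorSumLoop, dif_neg hdd, Finset.Ico_eq_empty (by omega), Finset.sum_empty,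
        add_zero]

theorem loop_eq_sum (m : Nat) (d : Nat) (t : Int) :
    properDivisorSumLoop (m : Int) d t
    = t + ∑ k ∈ Finset.Ico d (Nat.sqrt m + 1), contrib m k :=
  loop_eq_sum_aux m (Nat.sqrt m + 1 - d) d rfl t

-- the √m pairing: summed contributions are exactly the proper-divisor sum
theorem pairing (m : Nat) :
    ∑ k ∈ Finset.Ico 1 (Nat.sqrt m + 1), contrib m k = properSum m := by
  have hcontrib : ∑ k ∈ Finset.Ico 1 (Nat.sqrt m + 1), contrib m k
      = ∑ k ∈ (Finset.Ico 1 (Nat.sqrt m + 1)).filter (fun k => m % k = 0),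
          ((if k < m then (k : Int) else 0)
            + (if m / k ≠ k ∧ m / k < m then ((m / k : Nat) : Int) else 0)) := by
    rw [Finset.sum_filter]
    exact Finset.sum_congr rfl (fun k _ => rfl)
  have hsmall : ((Finset.Ico 1 (Nat.sqrt m + 1)).filter (fun k => m % k = 0)).filter
        (fun k => k < m)
      = ((Finset.Ico 1 m).filter (· ∣ m)).filter (fun k => k ≤ Nat.sqrt m) := by
    ext k
    simp only [Finset.mem_filter, Finset.mem_Ico, Nat.lt_succ_iff, ← Nat.dvd_iff_mod_eq_zero]
    constructor
    · rintro ⟨⟨⟨ha, hb⟩, hc⟩, hd⟩; exact ⟨⟨⟨ha, hd⟩, hc⟩, hb⟩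
    · rintro ⟨⟨⟨ha, hb⟩, hc⟩, hd⟩; exact ⟨⟨⟨ha, hd⟩, hc⟩, hb⟩
  have h1 : ∑ k ∈ (Finset.Ico 1 (Nat.sqrt m + 1)).filter (fun k => m % k = 0),
        (if k < m then (k : Int) else 0)
      = ∑ k ∈ ((Finset.Ico 1 m).filter (· ∣ m)).filter (fun k => k ≤ Nat.sqrt m), (k : Int) := by
    rw [← Finset.sum_filter, hsmall]
  have h2 : ∑ k ∈ (Finset.Ico 1 (Nat.sqrt m + 1)).filter (fun k => m % k = 0),
        (if m / k ≠ k ∧ m / k < m then ((m / k : Nat) : Int) else 0)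
      = ∑ i ∈ ((Finset.Ico 1 m).filter (· ∣ m)).filter (fun i => ¬ i ≤ Nat.sqrt m), (i : Int) := by
    rw [← Finset.sum_filter]
    refine Finset.sum_nbij' (fun k => m / k) (fun i => m / i) ?_ ?_ ?_ ?_ ?_
    · intro k hk
      simp only [Finset.mem_filter, Finset.mem_Ico, Nat.lt_succ_iff,
        ← Nat.dvd_iff_mod_eq_zero] at hk ⊢
      obtain ⟨⟨⟨hk1, hks⟩, hdvd⟩, hne, hlt⟩ := hk
      have hkk : k * k ≤ m := Nat.le_sqrt.mp hks
      have h11 : 1 * 1 ≤ k * k := Nat.mul_le_mul hk1 hk1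
      have hkm : k * 1 ≤ k * k := Nat.mul_le_mul_left k hk1
      have hm1 : 1 ≤ m := by omega
      have hdq : m / k ∣ m := Nat.div_dvd_of_dvd hdvd
      have hq1 : 1 ≤ m / k := (Nat.one_le_div_iff (by omega)).mpr (by omega)
      refine ⟨⟨⟨hq1, hlt⟩, hdq⟩, ?_⟩
      intro hle
      have e : m / k * k = m := Nat.div_mul_cancel hdvd
      have hs2 : Nat.sqrt m * Nat.sqrt m ≤ m := Nat.sqrt_le m
      have hup : m / k * k ≤ Nat.sqrt m * Nat.sqrt m := Nat.mul_le_mul hle hks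
      have hsm : m = Nat.sqrt m * Nat.sqrt m := by omega
      have hspos : 0 < Nat.sqrt m := by
        rcases Nat.eq_zero_or_pos (Nat.sqrt m) with h0 | h0
        · omega
        · exact h0
      have hqs : Nat.sqrt m ≤ m / k := by
        have : Nat.sqrt m * Nat.sqrt m ≤ m / k * Nat.sqrt m := by
          calc Nat.sqrt m * Nat.sqrt m = m / k * k := by omega
          _ ≤ m / k * Nat.sqrt m := Nat.mul_le_mul le_rfl hks
        exact Nat.le_of_mul_le_mul_right this hspos
      have hqeq : m / k = Nat.sqrt m := le_antisymm hle hqs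
      have hks' : Nat.sqrt m ≤ k := by
        have heq : Nat.sqrt m * Nat.sqrt m = Nat.sqrt m * k := by
          calc Nat.sqrt m * Nat.sqrt m = m := hsm.symm
          _ = m / k * k := e.symm
          _ = Nat.sqrt m * k := by rw [hqeq]
        exact Nat.le_of_mul_le_mul_left heq.le hspos
      exact hne (by omega)
    · intro i hi
      simp only [Finset.mem_filter, Finset.mem_Ico, Nat.lt_succ_iff,
        ← Nat.dvd_iff_mod_eq_zero, not_le] at hi ⊢
      obtain ⟨⟨⟨hi1, him⟩, hdvd⟩, hsi⟩ := hi
      have hm0 : m ≠ 0 := by omega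
      have hdq : m / i ∣ m := Nat.div_dvd_of_dvd hdvd
      have hq1 : 1 ≤ m / i := (Nat.one_le_div_iff (by omega)).mpr (by omega)
      have hqs : m / i ≤ Nat.sqrt m := by
        have h1' : m / i ≤ m / (Nat.sqrt m + 1) := Nat.div_le_div_left hsi (by omega)
        have h2' : m / (Nat.sqrt m + 1) < Nat.sqrt m + 1 :=
          (Nat.div_lt_iff_lt_mul (by omega)).mpr (Nat.lt_succ_sqrt m)
        omega
      have hdd : m / (m / i) = i := Nat.div_div_self hdvd hm0
      refine ⟨⟨⟨hq1, hqs⟩, hdq⟩, ?_, ?_⟩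
      · rw [hdd]; omega
      · rw [hdd]; exact him
    · intro k hk
      simp only [Finset.mem_filter, Finset.mem_Ico, Nat.lt_succ_iff,
        ← Nat.dvd_iff_mod_eq_zero] at hk
      obtain ⟨⟨⟨hk1, hks⟩, hdvd⟩, _, _⟩ := hk
      have hkk : k * k ≤ m := Nat.le_sqrt.mp hks
      have h11 : 1 * 1 ≤ k * k := Nat.mul_le_mul hk1 hk1
      exact Nat.div_div_self hdvd (by omega)
    · intro i hi
      simp only [Finset.mem_filter, Finset.mem_Ico] at hi
      obtain ⟨⟨⟨hi1, him⟩, hdvd⟩, _⟩ := hi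
      exact Nat.div_div_self hdvd (by omega)
    · intro k _
      rfl
  rw [hcontrib, Finset.sum_add_distrib, h1, h2, Finset.sum_filter_add_sum_filter_not]
  rfl

-- the two divisor-sum computations agree on every Int
theorem divsum_eq (n : Int) :
    (PySem.List.pyRange 1 n 1).foldl
      (fun total i => if PySem.Int.mod n i = 0 then total + i else total) 0
    = properDivisorSumLoop n 1 0 := by
  rcases (show 0 ≤ n ∨ n < 0 by omega) with hn | hn
  · obtain ⟨m, rfl⟩ := Int.eq_ofNat_of_zero_le hn
    rw [foldA_eq_properSum, loop_eq_sum, pairing, zero_add]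
  · rw [PySem.List.pyRange_one_eq_nil (by omega), properDivisorSumLoop,
      dif_neg (by push_cast; omega)]
    simp

-- ===== VERDICT (by name: the statement is the Claim_ definition above) =====
theorem check_friendly_spec : Claim_equal_check_friendly := by
  intro n1 n2 _
  unfold Spec_check_friendly check_friendly check_friendly_alt
  rw [divsum_eq n1, divsum_eq n2]
  set t1 := properDivisorSumLoop n1 1 0
  set t2 := properDivisorSumLoop n2 1 0
  by_cases h0 : n1 = n2
  · simp [h0]
  · by_cases h1 : t1 = n2 <;> by_cases h2 : t2 = n1 <;>
      simp [h0, h1, h2]
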